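-- pv_equiv track=rewrite | github.com/hy714335634/Nexus-AI | tools/generated_tools/ppt_to_markdown/markdown_formatter.py | _convert_to_setext_headings
-- ===== SOURCE A (Python) =====
-- def _convert_to_setext_headings(markdown_content: str) -> str:
--     """
--     Convert ATX-style headings (# Heading) to Setext-style headings (Heading\n======).
--
--     Args:
--         markdown_content: Markdown content with ATX headings
--
--     Returns:
--         str: Markdown content with Setext headings
--     """
--     lines = markdown_content.split("\n")
--     result = []
--
--     for line in lines:
--         if line.startswith("# "):
--             # H1: Convert "# Heading" to "Heading\n========"
--             heading_text = line[2:]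
--             result.append(heading_text)
--             result.append("=" * len(heading_text))
--         elif line.startswith("## "):
--             # H2: Convert "## Heading" to "Heading\n--------"
--             heading_text = line[3:]
--             result.append(heading_text)
--             result.append("-" * len(heading_text))
--         else:
--             # Keep other lines as they are
--             result.append(line)
--
--     return "\n".join(result)
-- ===== SOURCE B (Python) =====
-- import re
--
-- # One anchored MULTILINE regex does the whole conversion in a single pass over the
-- # string: no line list, no loop.  '(##?) ' greedily prefers '## ' over '# ', which
-- # matches A's branch order exactly; '.' never matches '\n', so group(2) is line[2:]
-- # (or line[3:]) and the underline has the same length.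
-- _HEADING_RE = re.compile(r'^(##?) (.*)$', re.MULTILINE)
--
--
-- def _convert_to_setext_headings(markdown_content: str) -> str:
--     def repl(m):
--         text = m.group(2)
--         return text + "\n" + ("=" if m.group(1) == "#" else "-") * len(text)
--
--     return _HEADING_RE.sub(repl, markdown_content)
-- ===== Notes on version B (the rewrite author's own statement) =====
-- stated objective: idiomatic
-- what changed: Replaces A's split/loop/startswith-branches/append/join pipeline with a single precompiled anchored MULTILINE regex substitution (re.sub with a replacement function) applied once to the whole string, maintaining no line list.
import Mathlib
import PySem

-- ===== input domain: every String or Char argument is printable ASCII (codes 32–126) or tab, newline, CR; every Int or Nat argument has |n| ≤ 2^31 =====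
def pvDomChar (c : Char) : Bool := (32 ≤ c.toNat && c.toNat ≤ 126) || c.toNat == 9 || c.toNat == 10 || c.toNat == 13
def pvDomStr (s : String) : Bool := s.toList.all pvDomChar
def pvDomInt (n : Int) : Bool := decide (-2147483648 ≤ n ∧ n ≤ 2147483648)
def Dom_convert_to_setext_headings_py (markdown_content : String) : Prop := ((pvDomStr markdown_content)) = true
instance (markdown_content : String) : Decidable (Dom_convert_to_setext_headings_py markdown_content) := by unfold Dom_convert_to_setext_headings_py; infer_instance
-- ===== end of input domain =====

-- B replaces A's split/loop/append with a single anchored-regex substitution pass; same return value, no speed claim.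

-- ===== PORT A =====
-- A: split("\n"), loop with startswith branches appending one or two lines, "\n".join
def convert_to_setext_headings_py (markdown_content : String) : String :=
  let lines := PySem.Chars.splitOn markdown_content.toList ['\n']
  let result := lines.foldl (fun acc line =>
    if PySem.Chars.startswith line ['#', ' '] then
      acc ++ [PySem.Chars.slice line (some 2) none,
              PySem.List.pyRepeat ['='] ((PySem.Chars.len (PySem.Chars.slice line (some 2) none) : Int))]
    else if PySem.Chars.startswith line ['#', '#', ' '] then
      acc ++ [PySem.Chars.slice line (some 3) none,
              PySem.List.pyRepeat ['-'] ((PySem.Chars.len (PySem.Chars.slice line (some 3) none) : Int))]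
    else acc ++ [line]) ([] : List (List Char))
  String.ofList (PySem.Chars.join ['\n'] result)

-- ===== PORT B =====
-- Hand port of Source B's single re.sub with the compiled MULTILINE pattern '^(##?) (.*)$'
-- (regex has no PySem/Lean counterpart).  Exact because the pattern is anchored at line
-- starts and '.' never matches '\n': re.sub's left-to-right scan visits exactly the
-- '\n'-separated line starts and each match consumes one whole line; '(##?)' is greedy,
-- so '## ' is tried before '# ', and the replacement function keeps the line text and
-- appends '\n' plus an underline of the same length.
def altLine (line : List Char) : List Char :=
  match line with
  | '#' :: '#' :: ' ' :: t => t ++ '\n' :: List.replicate t.length '-'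
  | '#' :: ' ' :: t => t ++ '\n' :: List.replicate t.length '='
  | _ => line

def altGo (cs : List Char) : List Char :=
  match h : cs.dropWhile (· ≠ '\n') with
  | [] => altLine (cs.takeWhile (· ≠ '\n'))
  | _ :: r => altLine (cs.takeWhile (· ≠ '\n')) ++ '\n' :: altGo r
termination_by cs.length
decreasing_by
  have h1 := List.length_dropWhile_le (· ≠ '\n') cs
  rw [h] at h1
  simp at h1
  omega

def convert_to_setext_headings_py_alt (markdown_content : String) : String :=
  String.ofList (altGo markdown_content.toList)

-- ===== PRECONDITION & SPEC =====
def Spec_convert_to_setext_headings_py (markdown_content : String) (out : String) : Prop := out = convert_to_setext_headings_py_alt markdown_content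
instance (markdown_content : String) (out : String) : Decidable (Spec_convert_to_setext_headings_py markdown_content out) := by unfold Spec_convert_to_setext_headings_py; infer_instance

-- ===== CLAIM (what is proved, stated in full; the proofs are below) =====
def Claim_equal_convert_to_setext_headings_py : Prop := ∀ (markdown_content : String), Dom_convert_to_setext_headings_py markdown_content → Spec_convert_to_setext_headings_py markdown_content (convert_to_setext_headings_py markdown_content)

-- ===== LEMMAS AND PROOFS =====

-- the list of lines of cs, split at '\n' (spec-side mirror of Python's split("\n"))
def pieces (cs : List Char) : List (List Char) :=
  match h : cs.dropWhile (· ≠ '\n') with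
  | [] => [cs.takeWhile (· ≠ '\n')]
  | _ :: r => cs.takeWhile (· ≠ '\n') :: pieces r
termination_by cs.length
decreasing_by
  have h1 := List.length_dropWhile_le (· ≠ '\n') cs
  rw [h] at h1
  simp at h1
  omega

-- the per-line block appended by A's loop body
def blk (line : List Char) : List (List Char) :=
  if PySem.Chars.startswith line ['#', ' '] then
    [PySem.Chars.slice line (some 2) none,
     PySem.List.pyRepeat ['='] ((PySem.Chars.len (PySem.Chars.slice line (some 2) none) : Int))]
  else if PySem.Chars.startswith line ['#', '#', ' '] then
    [PySem.Chars.slice line (some 3) none,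
     PySem.List.pyRepeat ['-'] ((PySem.Chars.len (PySem.Chars.slice line (some 3) none) : Int))]
  else [line]

lemma pieces_ne_nil (cs : List Char) : pieces cs ≠ [] := by
  rw [pieces]
  split <;> simp

lemma pieces_cons_of_ne (c : Char) (hc : ¬ c = '\n') (rest : List Char) :
    pieces (c :: rest) = (pieces rest).modifyHead (c :: ·) := by
  have hd : (c :: rest).dropWhile (· ≠ '\n') = rest.dropWhile (· ≠ '\n') := by
    simp [List.dropWhile, hc]
  rw [pieces]
  split
  · next h =>
    rw [hd] at h
    rw [pieces]
    split
    · next h' => simp [hc]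
    · next h' => rw [h] at h'; cases h'
  · next hd' r h =>
    rw [hd] at h
    conv_rhs => rw [pieces]
    split
    · next h' => rw [h] at h'; cases h'
    · next hd'' r' h' =>
      rw [h] at h'
      cases h'
      simp [hc]

lemma go_spec (fuel : Nat) : ∀ (l cur : List Char) (accs : List (List Char)),
    l.length < fuel →
    PySem.Chars.splitOn.go ['\n'] fuel l cur accs =
      accs.reverse ++ (pieces l).modifyHead (cur.reverse ++ ·) := by
  induction fuel with
  | zero => intro l cur accs h; omega
  | succ fuel ih =>
    intro l cur accs h
    cases l with
    | nil =>
      rw [PySem.Chars.splitOn.go, pieces]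
      simp
      omega
    | cons c rest =>
      rw [PySem.Chars.splitOn.go]
      by_cases hc : c = '\n'
      · subst hc
        have hp : List.isPrefixOf ['\n'] ('\n' :: rest) = true := by
          simp [List.isPrefixOf]
        simp only [hp, if_pos]
        rw [show List.drop ['\n'].length ('\n' :: rest) = rest from rfl]
        rw [ih rest [] _ (by simpa using Nat.lt_of_succ_lt_succ h)]
        have hpieces : pieces ('\n' :: rest) = [] :: pieces rest := by
          rw [pieces]
          cases h' : ('\n' :: rest).dropWhile (· ≠ '\n') with
          | nil => simp [List.dropWhile] at h'
          | cons a b =>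
            simp only [List.dropWhile] at h'
            simp at h'
            obtain ⟨rfl, rfl⟩ := h'
            simp
        rw [hpieces]
        cases pieces rest <;> simp
      · have hp : List.isPrefixOf ['\n'] (c :: rest) = false := by
          simp [List.isPrefixOf]
          exact fun h' => absurd h'.symm hc
        simp only [hp, Bool.false_eq_true, if_false]
        rw [ih rest (c :: cur) _ (by simpa using Nat.lt_of_succ_lt_succ h)]
        rw [pieces_cons_of_ne c hc rest]
        cases h' : pieces rest with
        | nil => exact absurd h' (pieces_ne_nil rest)
        | cons p ps => simp

lemma splitOn_eq_pieces (cs : List Char) : PySem.Chars.splitOn cs ['\n'] = pieces cs := by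
  unfold PySem.Chars.splitOn
  rw [go_spec (cs.length + 1) cs [] [] (by omega)]
  cases hp : pieces cs <;> simp

lemma foldA (lines : List (List Char)) (acc : List (List Char)) :
    lines.foldl (fun acc line =>
      if PySem.Chars.startswith line ['#', ' '] then
        acc ++ [PySem.Chars.slice line (some 2) none,
                PySem.List.pyRepeat ['='] ((PySem.Chars.len (PySem.Chars.slice line (some 2) none) : Int))]
      else if PySem.Chars.startswith line ['#', '#', ' '] then
        acc ++ [PySem.Chars.slice line (some 3) none,
                PySem.List.pyRepeat ['-'] ((PySem.Chars.len (PySem.Chars.slice line (some 3) none) : Int))]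
      else acc ++ [line]) acc = acc ++ lines.flatMap blk := by
  have hfun : (fun (acc : List (List Char)) line =>
      if PySem.Chars.startswith line ['#', ' '] then
        acc ++ [PySem.Chars.slice line (some 2) none,
                PySem.List.pyRepeat ['='] ((PySem.Chars.len (PySem.Chars.slice line (some 2) none) : Int))]
      else if PySem.Chars.startswith line ['#', '#', ' '] then
        acc ++ [PySem.Chars.slice line (some 3) none,
                PySem.List.pyRepeat ['-'] ((PySem.Chars.len (PySem.Chars.slice line (some 3) none) : Int))]
      else acc ++ [line]) = fun acc line => acc ++ blk line := by
    funext a l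
    unfold blk
    split_ifs <;> rfl
  rw [hfun]
  exact PySem.List.foldl_append_eq_flatMap blk lines acc

lemma slice_two (l : List Char) : PySem.List.slice l (some 2) none = l.drop 2 := by
  exact_mod_cast PySem.List.slice_from_natCast l 2

lemma slice_three (l : List Char) : PySem.List.slice l (some 3) none = l.drop 3 := by
  exact_mod_cast PySem.List.slice_from_natCast l 3

lemma blk_h1 (t : List Char) :
    blk ('#' :: ' ' :: t) = [t, List.replicate t.length '='] := by
  have hs : PySem.Chars.startswith ('#' :: ' ' :: t) ['#', ' '] = true :=
    (PySem.Chars.startswith_iff _ _).mpr ⟨t, rfl⟩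
  unfold blk
  simp [hs, slice_two, PySem.List.pyRepeat_singleton]

lemma blk_h2 (t : List Char) :
    blk ('#' :: '#' :: ' ' :: t) = [t, List.replicate t.length '-'] := by
  have hs1 : PySem.Chars.startswith ('#' :: '#' :: ' ' :: t) ['#', ' '] = false := by
    rw [Bool.eq_false_iff]
    intro h
    obtain ⟨u, hu⟩ := (PySem.Chars.startswith_iff _ _).mp h
    simp at hu
  have hs2 : PySem.Chars.startswith ('#' :: '#' :: ' ' :: t) ['#', '#', ' '] = true :=
    (PySem.Chars.startswith_iff _ _).mpr ⟨t, rfl⟩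
  unfold blk
  simp [hs1, hs2, slice_three, PySem.List.pyRepeat_singleton]

lemma blk_other (l : List Char)
    (h1 : ∀ t, l = '#' :: ' ' :: t → False) (h2 : ∀ t, l = '#' :: '#' :: ' ' :: t → False) :
    blk l = [l] := by
  have hs1 : PySem.Chars.startswith l ['#', ' '] = false := by
    rw [Bool.eq_false_iff]
    intro h
    obtain ⟨u, hu⟩ := (PySem.Chars.startswith_iff _ _).mp h
    exact h1 u hu.symm
  have hs2 : PySem.Chars.startswith l ['#', '#', ' '] = false := by
    rw [Bool.eq_false_iff]
    intro h
    obtain ⟨u, hu⟩ := (PySem.Chars.startswith_iff _ _).mp h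
    exact h2 u hu.symm
  unfold blk
  simp [hs1, hs2]

lemma join_blk_single (l : List Char) :
    PySem.Chars.join ['\n'] (blk l) = altLine l := by
  unfold altLine
  split
  · next t => rw [blk_h2, PySem.Chars.join_cons_cons, PySem.Chars.join_singleton]; simp
  · next t => rw [blk_h1, PySem.Chars.join_cons_cons, PySem.Chars.join_singleton]; simp
  · next h1 h2 =>
    rw [blk_other _ h2 h1, PySem.Chars.join_singleton]

lemma join_blk_append (l : List Char) (ps : List (List Char)) (hps : ps ≠ []) :
    PySem.Chars.join ['\n'] (blk l ++ ps) =
      altLine l ++ '\n' :: PySem.Chars.join ['\n'] ps := by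
  obtain ⟨q, rest, rfl⟩ := List.exists_cons_of_ne_nil hps
  unfold altLine
  split
  · next t =>
    rw [blk_h2]
    rw [show ([t, List.replicate t.length '-'] ++ q :: rest) =
        t :: List.replicate t.length '-' :: q :: rest by rfl]
    rw [PySem.Chars.join_cons_cons, PySem.Chars.join_cons_cons]
    simp
  · next t =>
    rw [blk_h1]
    rw [show ([t, List.replicate t.length '='] ++ q :: rest) =
        t :: List.replicate t.length '=' :: q :: rest by rfl]
    rw [PySem.Chars.join_cons_cons, PySem.Chars.join_cons_cons]
    simp
  · next h1 h2 =>
    rw [blk_other _ h2 h1]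
    rw [show (([l] : List (List Char)) ++ q :: rest) = l :: q :: rest by rfl]
    rw [PySem.Chars.join_cons_cons]
    simp

lemma flatMap_blk_ne_nil (ps : List (List Char)) (hps : ps ≠ []) :
    ps.flatMap blk ≠ [] := by
  obtain ⟨q, rest, rfl⟩ := List.exists_cons_of_ne_nil hps
  have hq : blk q ≠ [] := by
    unfold blk; split_ifs <;> simp
  simp only [List.flatMap_cons]
  intro h
  rw [List.append_eq_nil_iff] at h
  exact hq h.1

lemma pieces_eq_nil (cs : List Char) (h : cs.dropWhile (· ≠ '\n') = []) :
    pieces cs = [cs.takeWhile (· ≠ '\n')] := by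
  rw [pieces]
  split
  · rfl
  · next hd r h' => rw [h] at h'; cases h'

lemma pieces_eq_cons (cs : List Char) (hd : Char) (r : List Char)
    (h : cs.dropWhile (· ≠ '\n') = hd :: r) :
    pieces cs = cs.takeWhile (· ≠ '\n') :: pieces r := by
  rw [pieces]
  split
  · next h' => rw [h] at h'; cases h'
  · next hd' r' h' => rw [h] at h'; cases h'; rfl

lemma altGo_eq_nil (cs : List Char) (h : cs.dropWhile (· ≠ '\n') = []) :
    altGo cs = altLine (cs.takeWhile (· ≠ '\n')) := by
  rw [altGo]
  split
  · rfl
  · next hd r h' => rw [h] at h'; cases h'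

lemma altGo_eq_cons (cs : List Char) (hd : Char) (r : List Char)
    (h : cs.dropWhile (· ≠ '\n') = hd :: r) :
    altGo cs = altLine (cs.takeWhile (· ≠ '\n')) ++ '\n' :: altGo r := by
  rw [altGo]
  split
  · next h' => rw [h] at h'; cases h'
  · next hd' r' h' => rw [h] at h'; cases h'; rfl

lemma main_lemma (cs : List Char) :
    PySem.Chars.join ['\n'] ((pieces cs).flatMap blk) = altGo cs := by
  induction cs using altGo.induct with
  | case1 cs h =>
    rw [pieces_eq_nil cs h, altGo_eq_nil cs h]
    simp [join_blk_single]
  | case2 cs hd r h ih =>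
    rw [pieces_eq_cons cs hd r h, altGo_eq_cons cs hd r h, List.flatMap_cons,
        join_blk_append _ _ (flatMap_blk_ne_nil _ (pieces_ne_nil r)), ih]

-- ===== VERDICT (by name: the statement is the Claim_ definition above) =====
theorem convert_to_setext_headings_py_spec : Claim_equal_convert_to_setext_headings_py := by
  intro md _
  unfold Spec_convert_to_setext_headings_py
  simp only [convert_to_setext_headings_py, convert_to_setext_headings_py_alt]
  rw [splitOn_eq_pieces, foldA]
  simp only [List.nil_append]
  rw [main_lemma]
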